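-- pv_equiv track=rewrite | github.com/SultanAssel/EduAI_Smart_School | core/ai.py | _anonymize_usernames
-- ===== SOURCE A (Python) =====
-- def _anonymize_usernames(records):
--     """Replace real usernames with 'Student N' in a list of dicts for class reports."""
--     mapping = {}
--     counter = 0
--     out = []
--     for rec in records:
--         rec = dict(rec)
--         uname = rec.get('student__username', '')
--         if uname and uname not in mapping:
--             counter += 1
--             mapping[uname] = f'Student {counter}'
--         if uname:
--             rec['student__username'] = mapping[uname]
--         out.append(rec)
--     return out
-- ===== SOURCE B (Python) =====
-- def _apply_mapping(mapping, rec):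
--     d = dict(rec)
--     uname = d.get('student__username', '')
--     if uname:
--         d['student__username'] = mapping[uname]
--     return d
--
-- def _anonymize_usernames(records):
--     """Replace real usernames with 'Student N' in a list of dicts for class reports."""
--     mapping = {}
--     for rec in records:
--         uname = dict(rec).get('student__username', '')
--         if uname and uname not in mapping:
--             mapping[uname] = f'Student {len(mapping) + 1}'
--     return [_apply_mapping(mapping, rec) for rec in records]
-- ===== Notes on version B (the rewrite author's own statement) =====
-- stated objective: alternative
-- what changed: A interleaves table construction and rewriting in one stateful loop over (mapping, counter, out); B first builds the username->label table in its own pass (label number = current table size + 1) and then produces the output as a map/comprehension applying the finished table to each record.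
import Mathlib
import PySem

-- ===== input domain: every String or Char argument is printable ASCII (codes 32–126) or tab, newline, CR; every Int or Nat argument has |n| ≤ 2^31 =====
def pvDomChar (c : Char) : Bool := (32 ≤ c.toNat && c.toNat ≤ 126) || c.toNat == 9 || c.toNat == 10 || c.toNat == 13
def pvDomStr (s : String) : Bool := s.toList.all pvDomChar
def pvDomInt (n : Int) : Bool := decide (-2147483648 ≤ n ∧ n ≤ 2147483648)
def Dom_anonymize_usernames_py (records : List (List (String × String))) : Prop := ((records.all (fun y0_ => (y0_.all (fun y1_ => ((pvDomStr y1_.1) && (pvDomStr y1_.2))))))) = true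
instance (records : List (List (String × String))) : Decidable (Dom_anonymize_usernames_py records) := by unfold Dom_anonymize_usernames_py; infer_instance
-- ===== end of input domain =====

-- B separates the one stateful loop of A into a table-building pass followed by a map applying the finished table (alternative decomposition, same cost).

-- ===== PORT A =====
-- A's loop body: state = (mapping, counter, out), exactly A's three loop variables.
def pvAStep (st : PySem.Dict String String × Int × List (List (String × String)))
    (rec : List (String × String)) :
    PySem.Dict String String × Int × List (List (String × String)) :=
  let d := PySem.Dict.ofList rec               -- rec = dict(rec)
  let uname := d.getD "student__username" ""   -- rec.get('student__username', '')
  let mc : PySem.Dict String String × Int :=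
    if uname ≠ "" ∧ st.1.contains uname = false
    then (st.1.insert uname ("Student " ++ PySem.Int.toStr (st.2.1 + 1)), st.2.1 + 1)
    else (st.1, st.2.1)
  -- rec['student__username'] = mapping[uname]; the key is present here, so getD is exact
  let d2 := if uname ≠ "" then d.insert "student__username" (mc.1.getD uname "") else d
  (mc.1, mc.2, st.2.2 ++ [d2.items])

def anonymize_usernames_py (records : List (List (String × String))) : List (List (String × String)) :=
  (records.foldl pvAStep (PySem.Dict.empty, 0, [])).2.2

-- ===== PORT B =====
-- B first pass: build the username -> 'Student N' table (N = current table size + 1).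
def pvBStep (m : PySem.Dict String String) (rec : List (String × String)) : PySem.Dict String String :=
  let u := (PySem.Dict.ofList rec).getD "student__username" ""
  if u ≠ "" ∧ m.contains u = false
  then m.insert u ("Student " ++ PySem.Int.toStr ((m.size : Int) + 1))
  else m

def pvBuild (records : List (List (String × String))) : PySem.Dict String String :=
  records.foldl pvBStep PySem.Dict.empty

-- B second pass: mapping[uname] ported as getD (exact: the first pass inserted every truthy uname).
def pvApply (m : PySem.Dict String String) (rec : List (String × String)) : List (String × String) :=
  let d := PySem.Dict.ofList rec
  let u := d.getD "student__username" ""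
  if u ≠ "" then (d.insert "student__username" (m.getD u "")).items else d.items

def anonymize_usernames_py_alt (records : List (List (String × String))) : List (List (String × String)) :=
  records.map (pvApply (pvBuild records))

-- ===== PRECONDITION & SPEC =====
def Spec_anonymize_usernames_py (records : List (List (String × String))) (out : List (List (String × String))) : Prop := out = anonymize_usernames_py_alt records
instance (records : List (List (String × String))) (out : List (List (String × String))) : Decidable (Spec_anonymize_usernames_py records out) := by unfold Spec_anonymize_usernames_py; infer_instance

-- ===== CLAIM (what is proved, stated in full; the proofs are below) =====
def Claim_equal_anonymize_usernames_py : Prop := ∀ (records : List (List (String × String))), Dom_anonymize_usernames_py records → Spec_anonymize_usernames_py records (anonymize_usernames_py records)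

-- ===== LEMMAS AND PROOFS =====

-- The table-building pass only inserts fresh keys, so an existing binding survives it.
theorem pvBuild_mono (rest : List (List (String × String))) (m0 : PySem.Dict String String)
    (k : String) (v : String) (h : m0.get? k = some v) :
    (rest.foldl pvBStep m0).get? k = some v := by
  induction rest generalizing m0 with
  | nil => exact h
  | cons rec rest ih =>
    simp only [List.foldl_cons]
    apply ih
    simp only [pvBStep]
    split_ifs with hc
    · have hk : k ≠ ((PySem.Dict.ofList rec).getD "student__username" "") := by
        intro he
        rw [← he] at hc
        rw [PySem.Dict.contains_eq_isSome_get?, h] at hc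
        simp at hc
      rw [PySem.Dict.get?_insert_of_ne _ _ hk]
      exact h
    · exact h

theorem pvBuild_getD (rest : List (List (String × String))) (m0 : PySem.Dict String String)
    (k : String) (h : m0.contains k = true) :
    (rest.foldl pvBStep m0).getD k "" = m0.getD k "" := by
  rw [PySem.Dict.contains_eq_isSome_get?] at h
  obtain ⟨v, hv⟩ := Option.isSome_iff_exists.mp h
  rw [PySem.Dict.getD_of_get?_eq_some _ "" hv,
      PySem.Dict.getD_of_get?_eq_some _ "" (pvBuild_mono rest m0 k v hv)]

-- Main invariant: with counter = mapping.size, A's remaining loop produces exactly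
-- out ++ (rest mapped through B's finished table built from the same mapping).
theorem pv_main (rest : List (List (String × String))) (m0 : PySem.Dict String String)
    (out : List (List (String × String))) :
    (rest.foldl pvAStep (m0, ((m0.size : Int), out))).2.2
      = out ++ rest.map (pvApply (rest.foldl pvBStep m0)) := by
  induction rest generalizing m0 out with
  | nil => simp
  | cons rec rest ih =>
    simp only [List.foldl_cons, List.map_cons]
    by_cases hu : ((PySem.Dict.ofList rec).getD "student__username" "") = ""
    · have hA : pvAStep (m0, ((m0.size : Int), out)) rec
          = (m0, ((m0.size : Int), out ++ [(PySem.Dict.ofList rec).items])) := by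
        simp [pvAStep, hu]
      have hB : pvBStep m0 rec = m0 := by simp [pvBStep, hu]
      have hAp : pvApply (rest.foldl pvBStep m0) rec = (PySem.Dict.ofList rec).items := by
        simp [pvApply, hu]
      rw [hA, hB, hAp, ih m0 (out ++ [(PySem.Dict.ofList rec).items])]
      simp
    · by_cases hc : m0.contains ((PySem.Dict.ofList rec).getD "student__username" "") = true
      · have hA : pvAStep (m0, ((m0.size : Int), out)) rec
            = (m0, ((m0.size : Int), out ++
                [((PySem.Dict.ofList rec).insert "student__username"
                    (m0.getD ((PySem.Dict.ofList rec).getD "student__username" "") "")).items])) := by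
          simp [pvAStep, hu, hc]
        have hB : pvBStep m0 rec = m0 := by simp [pvBStep, hu, hc]
        have hAp : pvApply (rest.foldl pvBStep m0) rec
            = ((PySem.Dict.ofList rec).insert "student__username"
                (m0.getD ((PySem.Dict.ofList rec).getD "student__username" "") "")).items := by
          have h2 := pvBuild_getD rest m0 ((PySem.Dict.ofList rec).getD "student__username" "") hc
          simp [pvApply, hu, h2]
        rw [hA, hB, hAp, ih m0 _]
        simp
      · have hcf : m0.contains ((PySem.Dict.ofList rec).getD "student__username" "") = false := by simpa using hc
        obtain ⟨lbl, hl⟩ : ∃ lbl : String, ("Student " ++ PySem.Int.toStr ((m0.size : Int) + 1)) = lbl := ⟨_, rfl⟩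
        have hsize : ((m0.size : Int) + 1) = (((m0.insert ((PySem.Dict.ofList rec).getD "student__username" "") lbl).size : Int)) := by
          rw [PySem.Dict.size_insert, if_neg (by simp [hcf])]
          push_cast; ring
        have hA : pvAStep (m0, ((m0.size : Int), out)) rec
            = (m0.insert ((PySem.Dict.ofList rec).getD "student__username" "") lbl,
               ((m0.size : Int) + 1, out ++
                [((PySem.Dict.ofList rec).insert "student__username" lbl).items])) := by
          simp [pvAStep, hu, hcf, hl]
        have hB : pvBStep m0 rec = m0.insert ((PySem.Dict.ofList rec).getD "student__username" "") lbl := by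
          simp [pvBStep, hu, hcf, hl]
        have hAp : pvApply (rest.foldl pvBStep (m0.insert ((PySem.Dict.ofList rec).getD "student__username" "") lbl)) rec
            = ((PySem.Dict.ofList rec).insert "student__username" lbl).items := by
          have h2 : (rest.foldl pvBStep (m0.insert ((PySem.Dict.ofList rec).getD "student__username" "") lbl)).getD ((PySem.Dict.ofList rec).getD "student__username" "") "" = lbl :=
            PySem.Dict.getD_of_get?_eq_some _ ""
              (pvBuild_mono rest _ ((PySem.Dict.ofList rec).getD "student__username" "") lbl (PySem.Dict.get?_insert_self _ _ _))
          simp [pvApply, hu, h2]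
        rw [hA, hsize, hB, hAp, ih (m0.insert ((PySem.Dict.ofList rec).getD "student__username" "") lbl) _]
        simp

-- ===== VERDICT (by name: the statement is the Claim_ definition above) =====
theorem anonymize_usernames_py_spec : Claim_equal_anonymize_usernames_py := by
  intro records _
  unfold Spec_anonymize_usernames_py anonymize_usernames_py anonymize_usernames_py_alt pvBuild
  have h0 : (0 : Int) = ((PySem.Dict.empty : PySem.Dict String String).size : Int) := by
    rw [PySem.Dict.size_empty]; rfl
  rw [h0, pv_main records PySem.Dict.empty []]
  simp
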